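-- pv_equiv track=rewrite | github.com/lololalayoho/Algo_share | 20210111/스타트와 링크/lololalayoho.py | calcul_score
-- ===== SOURCE A (Python) =====
-- from itertools import combinations
--
-- def calcul_score(scoreboard,players,N):
--     max_gap = 999999999
--     combi = combinations(players,N//2)
--     for think in list(set(combi)):
--         sum1 = 0 #visit값이 1인 애들을 더할 변수
--         sum2 = 0 #visit값이 0인 애들을 더할 변수
--         zero = []
--         for i in range(N):
--             if i not in list(think):
--                 zero.append(i)
--         for i in list(think):
--             for j in list(think):
--                 sum1 = sum1 + scoreboard[i][j]
--         for i in zero: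
--             for j in zero:
--                 sum2 = sum2 + scoreboard[i][j]
--         if max_gap > abs(sum1-sum2):
--             max_gap = abs(sum1-sum2)
--     return max_gap
-- ===== SOURCE B (Python) =====
-- def calcul_score(scoreboard, players, N):
--     k = N // 2
--
--     def gap(team):
--         zero = [i for i in range(N) if i not in team]
--         sum1 = sum(scoreboard[i][j] for i in team for j in team)
--         sum2 = sum(scoreboard[i][j] for i in zero for j in zero)
--         return abs(sum1 - sum2)
--
--     def go(rest, chosen, best):
--         if len(chosen) == k:
--             return min(best, gap(chosen))
--         if not rest:
--             return best
--         return go(rest[1:], chosen, go(rest[1:], chosen + [rest[0]], best))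
--
--     return go(players, [], 999999999)
-- ===== Notes on version B (the rewrite author's own statement) =====
-- stated objective: alternative
-- what changed: Replaced itertools.combinations materialized through set() with a recursive backtracking enumeration that walks the player list carrying the chosen prefix and the running minimum, and computes each split's sums with comprehensions instead of nested accumulator loops.
-- outside the precondition, e.g. on calcul_score([[1, 2], [3, 4], [5]], [0, 1], 2): A returns 3, B returns 3
import Mathlib
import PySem

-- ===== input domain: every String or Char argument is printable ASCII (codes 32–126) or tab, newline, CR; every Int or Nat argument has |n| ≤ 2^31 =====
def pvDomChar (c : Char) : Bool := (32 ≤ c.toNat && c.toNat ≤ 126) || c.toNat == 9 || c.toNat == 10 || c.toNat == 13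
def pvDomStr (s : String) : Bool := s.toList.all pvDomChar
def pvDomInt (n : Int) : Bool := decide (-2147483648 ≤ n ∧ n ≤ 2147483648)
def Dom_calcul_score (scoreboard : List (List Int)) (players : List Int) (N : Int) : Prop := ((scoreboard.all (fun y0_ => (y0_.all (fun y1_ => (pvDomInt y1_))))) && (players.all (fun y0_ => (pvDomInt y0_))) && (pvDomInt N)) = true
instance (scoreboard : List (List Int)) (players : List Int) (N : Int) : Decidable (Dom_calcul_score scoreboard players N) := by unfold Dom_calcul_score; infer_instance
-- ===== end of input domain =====

-- B replaces itertools.combinations + set materialization with recursive backtracking over the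
-- player list (same results; objective: alternative decomposition, no speed claim).


-- scoreboard[i][j]; exact (= the Python subscript) whenever both indices are in Python range
-- (Pre_ guarantees that); 0 elsewhere, where Python raises IndexError.
def idx2 (b : List (List Int)) (i j : Int) : Int :=
  match PySem.List.pyGet? b i with
  | some row => (PySem.List.pyGet? row j).getD 0
  | none => 0

-- ===== PORT A =====
-- itertools.combinations(l, k) in its emission order, tuples as lists
def combosA : List Int → Nat → List (List Int)
  | _, 0 => [[]]
  | [], _ + 1 => []
  | x :: xs, k + 1 => ((combosA xs k).map (fun c => x :: c)) ++ combosA xs (k + 1)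

def calcul_score (scoreboard : List (List Int)) (players : List Int) (N : Int) : Int :=
  let k := (PySem.Int.floordiv N 2).toNat
  (PySem.Set.ofList (combosA players k)).foldl (fun max_gap think =>
    let zero : List Int :=
      (PySem.List.pyRange 0 N 1).foldl
        (fun z i => if !(think.contains i) then z ++ [i] else z) []
    let sum1 := think.foldl (fun s i => think.foldl (fun s2 j => s2 + idx2 scoreboard i j) s) 0
    let sum2 := zero.foldl (fun s i => zero.foldl (fun s2 j => s2 + idx2 scoreboard i j) s) 0
    if |sum1 - sum2| < max_gap then |sum1 - sum2| else max_gap) 999999999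

-- ===== PORT B =====
def gapB (scoreboard : List (List Int)) (N : Int) (team : List Int) : Int :=
  let zero := (PySem.List.pyRange 0 N 1).filter (fun i => !(team.contains i))
  let sum1 := (team.flatMap (fun i => team.map (fun j => idx2 scoreboard i j))).sum
  let sum2 := (zero.flatMap (fun i => zero.map (fun j => idx2 scoreboard i j))).sum
  |sum1 - sum2|

def goB (scoreboard : List (List Int)) (N k : Int) (rest chosen : List Int) (best : Int) : Int :=
  if (chosen.length : Int) = k then min best (gapB scoreboard N chosen)
  else match rest with
    | [] => best
    | x :: xs => goB scoreboard N k xs chosen (goB scoreboard N k xs (chosen ++ [x]) best)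
termination_by rest

def calcul_score_alt (scoreboard : List (List Int)) (players : List Int) (N : Int) : Int :=
  goB scoreboard N (PySem.Int.floordiv N 2) players [] 999999999

-- ===== PRECONDITION & SPEC =====
-- Pre_ admits 0 ≤ N and either the degenerate case (fewer players than N//2: no split exists,
-- both return the sentinel untouched) or a board with ≥ N rows, each row at least as long as the
-- row count, and (unless N//2 = 0, where players are never used as indices) all players legal
-- (possibly negative) row indices — what keeps every scoreboard[i][j] access in range.
-- Pre_ is slightly conservative: A also returns on a few ragged/short boards whose out-of-range
-- rows happen never to be touched, and B agrees with A there too.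
def Pre_calcul_score (scoreboard : List (List Int)) (players : List Int) (N : Int) : Prop :=
  0 ≤ N ∧
  ( (players.length : Int) < PySem.Int.floordiv N 2 ∨
    ( N ≤ (scoreboard.length : Int) ∧
      (∀ row ∈ scoreboard, scoreboard.length ≤ row.length) ∧
      ( N ≤ 1 ∨
        ∀ p ∈ players, -(scoreboard.length : Int) ≤ p ∧ p < (scoreboard.length : Int) ) ) )
instance (scoreboard : List (List Int)) (players : List Int) (N : Int) : Decidable (Pre_calcul_score scoreboard players N) := by unfold Pre_calcul_score; infer_instance

def pvWitness_calcul_score : List (List Int) × List Int × Int := ([[1, 2], [3, 4]], [0, 1], 2)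

def Spec_calcul_score (scoreboard : List (List Int)) (players : List Int) (N : Int) (out : Int) : Prop := out = calcul_score_alt scoreboard players N
instance (scoreboard : List (List Int)) (players : List Int) (N : Int) (out : Int) : Decidable (Spec_calcul_score scoreboard players N out) := by unfold Spec_calcul_score; infer_instance

-- ===== CLAIM (what is proved, stated in full; the proofs are below) =====
def Claim_equal_calcul_score : Prop := ∀ (scoreboard : List (List Int)) (players : List Int) (N : Int), Dom_calcul_score scoreboard players N → Pre_calcul_score scoreboard players N → Spec_calcul_score scoreboard players N (calcul_score scoreboard players N)

-- ===== LEMMAS AND PROOFS =====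

-- nested accumulator double loop = sum over the flattened products
theorem foldl2_add_eq_sum (g : Int → Int → Int) (l m : List Int) (s : Int) :
    l.foldl (fun s i => m.foldl (fun s2 j => s2 + g i j) s) s
      = s + (l.flatMap (fun i => m.map (g i))).sum := by
  simp only [PySem.List.foldl_add]
  simp [List.flatMap, List.sum_flatten, List.map_map, Function.comp_def]

-- A's per-combination body is exactly gapB, and its update is a min
theorem stepA_eq (sb : List (List Int)) (N m : Int) (t : List Int) :
    (let zero : List Int :=
        (PySem.List.pyRange 0 N 1).foldl
          (fun z i => if !(t.contains i) then z ++ [i] else z) []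
     let sum1 := t.foldl (fun s i => t.foldl (fun s2 j => s2 + idx2 sb i j) s) 0
     let sum2 := zero.foldl (fun s i => zero.foldl (fun s2 j => s2 + idx2 sb i j) s) 0
     if |sum1 - sum2| < m then |sum1 - sum2| else m) = min m (gapB sb N t) := by
  have hmin : ∀ a c : Int, (if c < a then c else a) = min a c := by
    intro a c; rw [min_comm, min_def]; split_ifs <;> omega
  simp only [PySem.List.foldl_append_if_eq_filter, List.nil_append,
    foldl2_add_eq_sum, zero_add, gapB, hmin]

def foldmin (g : List Int → Int) (b : Int) (l : List (List Int)) : Int :=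
  l.foldl (fun m t => min m (g t)) b

theorem foldmin_le_init (g : List Int → Int) : ∀ (l : List (List Int)) (b : Int),
    foldmin g b l ≤ b := by
  intro l
  induction l with
  | nil => intro b; simp [foldmin]
  | cons y ys ih =>
      intro b
      exact le_trans (ih (min b (g y))) (min_le_left _ _)

theorem foldmin_le_mem (g : List Int → Int) : ∀ (l : List (List Int)) (b : Int) (x : List Int),
    x ∈ l → foldmin g b l ≤ g x := by
  intro l
  induction l with
  | nil => intro b x hx; simp at hx
  | cons y ys ih =>
      intro b x hx
      rw [List.mem_cons] at hx
      rcases hx with rfl | hx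
      · exact le_trans (foldmin_le_init g ys (min b (g x))) (min_le_right _ _)
      · exact ih (min b (g y)) x hx

theorem le_foldmin (g : List Int → Int) : ∀ (l : List (List Int)) (b c : Int),
    c ≤ b → (∀ x ∈ l, c ≤ g x) → c ≤ foldmin g b l := by
  intro l
  induction l with
  | nil => intro b c hc _; simpa [foldmin] using hc
  | cons y ys ih =>
      intro b c hc hall
      exact ih _ _ (le_min hc (hall y (by simp))) (fun x hx => hall x (List.mem_cons_of_mem _ hx))

-- min-folds over lists with the same elements agree (dedup by set() is harmless here)
theorem foldmin_eq_of_mem_iff (g : List Int → Int) (l1 l2 : List (List Int)) (b : Int)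
    (h : ∀ x, x ∈ l1 ↔ x ∈ l2) :
    l1.foldl (fun m t => min m (g t)) b = l2.foldl (fun m t => min m (g t)) b := by
  have key : ∀ (l1 l2 : List (List Int)), (∀ x, x ∈ l1 ↔ x ∈ l2) →
      foldmin g b l1 ≤ foldmin g b l2 := by
    intro l1 l2 h
    exact le_foldmin g l2 b _ (foldmin_le_init g l1 b)
      (fun x hx => foldmin_le_mem g l1 b x ((h x).mpr hx))
  exact le_antisymm (key l1 l2 h) (key l2 l1 (fun x => (h x).symm))

theorem goB_eq_fold (sb : List (List Int)) (N : Int) (kn : Nat) :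
    ∀ (rest chosen : List Int) (best : Int), chosen.length ≤ kn →
      goB sb N (kn : Int) rest chosen best
        = ((combosA rest (kn - chosen.length)).map (fun c => chosen ++ c)).foldl
            (fun b c => min b (gapB sb N c)) best := by
  intro rest
  induction rest with
  | nil =>
      intro chosen best hle
      rw [goB]
      by_cases h : chosen.length = kn
      · simp [h, combosA]
      · have hd : kn - chosen.length = (kn - chosen.length - 1) + 1 := by omega
        rw [hd]
        rw [if_neg (show ¬((chosen.length : Int) = (kn : Int)) from by exact_mod_cast h)]
        simp [combosA]
  | cons x xs ih =>
      intro chosen best hle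
      rw [goB]
      by_cases h : chosen.length = kn
      · simp [h, combosA]
      · have hd : kn - chosen.length = (kn - chosen.length - 1) + 1 := by omega
        have hlen : (chosen ++ [x]).length ≤ kn := by simp; omega
        have hd2 : kn - (chosen ++ [x]).length = kn - chosen.length - 1 := by simp; omega
        rw [if_neg (show ¬((chosen.length : Int) = (kn : Int)) from by exact_mod_cast h)]
        rw [hd]
        show goB sb N (kn : Int) xs chosen (goB sb N (kn : Int) xs (chosen ++ [x]) best) = _
        rw [ih chosen _ hle, ih (chosen ++ [x]) best hlen, hd2]
        simp only [combosA, List.map_append, List.foldl_append, List.map_map]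
        congr 1
        · simp [Function.comp_def]
        · rw [← hd]

-- ===== VERDICT (by name: the statement is the Claim_ definition above) =====
theorem calcul_score_spec : Claim_equal_calcul_score := by
  intro sb players N _ hpre
  unfold Spec_calcul_score calcul_score calcul_score_alt
  obtain ⟨hN, -⟩ := hpre
  have hk : 0 ≤ PySem.Int.floordiv N 2 := by
    rw [PySem.Int.floordiv_eq_ediv_of_pos (by norm_num)]
    exact Int.ediv_nonneg hN (by norm_num)
  set kn := (PySem.Int.floordiv N 2).toNat with hkn
  have hcast : (kn : Int) = PySem.Int.floordiv N 2 := Int.toNat_of_nonneg hk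
  rw [← hcast]
  have hstep : (fun (max_gap : Int) (think : List Int) =>
      let zero : List Int :=
        (PySem.List.pyRange 0 N 1).foldl
          (fun z i => if !(think.contains i) then z ++ [i] else z) []
      let sum1 := think.foldl (fun s i => think.foldl (fun s2 j => s2 + idx2 sb i j) s) 0
      let sum2 := zero.foldl (fun s i => zero.foldl (fun s2 j => s2 + idx2 sb i j) s) 0
      if |sum1 - sum2| < max_gap then |sum1 - sum2| else max_gap)
      = fun m t => min m (gapB sb N t) := by
    funext m t
    exact stepA_eq sb N m t
  rw [hstep]
  rw [goB_eq_fold sb N kn players [] 999999999 (Nat.zero_le _)]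
  simp only [List.nil_append, List.length_nil, Nat.sub_zero, List.map_id']
  exact foldmin_eq_of_mem_iff (gapB sb N) _ _ 999999999
    (fun x => PySem.Set.mem_ofList (combosA players kn) x)
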